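-- pv_equiv track=rewrite | github.com/cirosantilli/project-euler-solvers | solvers/322.py | count_supermask_lt
-- ===== SOURCE A (Python) =====
-- def count_supermask_lt(limit: int, mask: int) -> int:
--     """Count integers x with 0 <= x < limit and (x & mask) == mask."""
--     if limit <= 0:
--         return 0
--
--     bits = limit.bit_length()
--     # Digit-DP over bits with a "tight" (=equal-prefix) and "loose" (<prefix) state.
--     dp_tight = 1
--     dp_loose = 0
--     for p in range(bits - 1, -1, -1):
--         lim_bit = (limit >> p) & 1
--         forced = (mask >> p) & 1
--         new_tight = 0
--         new_loose = 0
--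
--         # Already < limit: lim_bit irrelevant.
--         if dp_loose:
--             if forced:
--                 new_loose += dp_loose
--             else:
--                 new_loose += dp_loose * 2
--
--         # Still equal to limit's prefix.
--         if dp_tight:
--             if forced:
--                 # Must set 1.
--                 if lim_bit == 1:
--                     new_tight += dp_tight
--             else:
--                 # Can choose 0/1 within the limit.
--                 if lim_bit == 0:
--                     new_tight += dp_tight  # choose 0
--                 else:
--                     new_loose += dp_tight  # choose 0, becomes loose
--                     new_tight += dp_tight  # choose 1, stays tight
--
--         dp_tight, dp_loose = new_tight, new_loose
--
--     # dp_tight corresponds to x == limit, which we must exclude.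
--     return dp_loose
-- ===== SOURCE B (Python) =====
-- def count_supermask_lt(limit: int, mask: int) -> int:
--     """Count integers x with 0 <= x < limit and (x & mask) == mask.
--
--     Single ascending pass: accumulate 2**free for each position where limit
--     has a 1 and mask a 0; reset the accumulator when a forced mask bit meets
--     a 0 bit of limit (that invalidates every lower contribution)."""
--     if limit <= 0:
--         return 0
--     total = 0
--     free = 0
--     for p in range(limit.bit_length()):
--         lim_bit = (limit >> p) & 1
--         mask_bit = (mask >> p) & 1
--         if mask_bit == 1:
--             if lim_bit == 0:
--                 total = 0
--         else:
--             if lim_bit == 1: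
--                 total += 1 << free
--             free += 1
--     return total
-- ===== Notes on version B (the rewrite author's own statement) =====
-- stated objective: simpler
-- what changed: Replaced the two-state (tight/loose) digit DP over descending bit positions by a single ascending pass that adds 2^free at each position where limit has a 1 over a 0 mask bit and resets the accumulator when a forced mask bit meets a 0 bit of limit.
import Mathlib
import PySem

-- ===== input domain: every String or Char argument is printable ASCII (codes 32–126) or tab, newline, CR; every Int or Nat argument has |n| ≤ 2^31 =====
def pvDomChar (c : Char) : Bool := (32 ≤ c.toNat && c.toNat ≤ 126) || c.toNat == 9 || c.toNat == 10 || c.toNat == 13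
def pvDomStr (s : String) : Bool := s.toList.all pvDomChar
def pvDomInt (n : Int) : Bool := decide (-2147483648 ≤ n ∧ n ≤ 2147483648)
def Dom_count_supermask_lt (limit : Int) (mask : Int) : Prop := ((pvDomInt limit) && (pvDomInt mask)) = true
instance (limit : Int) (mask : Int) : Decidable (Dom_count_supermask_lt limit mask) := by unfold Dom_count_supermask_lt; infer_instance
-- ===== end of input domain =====

-- B replaces A's two-state digit DP by a single ascending pass that adds 2^free at each
-- countable position and resets on a forced bit meeting a 0 of limit (objective: simpler).

-- ===== PORT A =====
-- (x >> p) & 1, exact Python semantics also on negatives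
def pvBit (x : Int) (p : Nat) : Int := PySem.Int.band (x >>> p) 1

-- one iteration of A's for-body at position p, state (dp_tight, dp_loose)
def pvAStep (limit mask : Int) (p : Nat) (st : Int × Int) : Int × Int :=
  let lim_bit := pvBit limit p
  let forced := pvBit mask p
  let new_tight : Int := 0
  let new_loose : Int := 0
  let new_loose := if st.2 ≠ 0 then
      (if forced ≠ 0 then new_loose + st.2 else new_loose + st.2 * 2)
    else new_loose
  let (new_tight, new_loose) := if st.1 ≠ 0 then
      (if forced ≠ 0 then
        (if lim_bit == 1 then (new_tight + st.1, new_loose) else (new_tight, new_loose))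
      else
        (if lim_bit == 0 then (new_tight + st.1, new_loose)
         else (new_tight + st.1, new_loose + st.1)))
    else (new_tight, new_loose)
  (new_tight, new_loose)

-- `for p in range(bits-1, -1, -1)`: pvALoop n runs positions n-1 … 0 (highest first)
def pvALoop (limit mask : Int) : Nat → Int × Int → Int × Int
  | 0, st => st
  | k + 1, st => pvALoop limit mask k (pvAStep limit mask k st)

def count_supermask_lt (limit : Int) (mask : Int) : Int :=
  if limit ≤ 0 then 0
  else
    let bits := PySem.Int.bitLength limit
    (pvALoop limit mask bits (1, 0)).2

-- ===== PORT B =====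
-- one iteration of B's for-body at position p, state (total, free)
def pvBStep (limit mask : Int) (p : Nat) (st : Int × Nat) : Int × Nat :=
  let lim_bit := pvBit limit p
  let mask_bit := pvBit mask p
  if mask_bit == 1 then
    (if lim_bit == 0 then (0, st.2) else st)
  else
    ((if lim_bit == 1 then st.1 + 2 ^ st.2 else st.1), st.2 + 1)

-- `for p in range(bits)`: pvBLoop n is the state after positions 0 … n-1 (lowest first)
def pvBLoop (limit mask : Int) : Nat → Int × Nat
  | 0 => (0, 0)
  | n + 1 => pvBStep limit mask n (pvBLoop limit mask n)

def count_supermask_lt_alt (limit : Int) (mask : Int) : Int :=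
  if limit ≤ 0 then 0
  else (pvBLoop limit mask (PySem.Int.bitLength limit)).1

-- ===== PRECONDITION & SPEC =====
def Spec_count_supermask_lt (limit : Int) (mask : Int) (out : Int) : Prop := out = count_supermask_lt_alt limit mask
instance (limit : Int) (mask : Int) (out : Int) : Decidable (Spec_count_supermask_lt limit mask out) := by unfold Spec_count_supermask_lt; infer_instance

-- ===== CLAIM (what is proved, stated in full; the proofs are below) =====
def Claim_equal_count_supermask_lt : Prop := ∀ (limit : Int) (mask : Int), Dom_count_supermask_lt limit mask → Spec_count_supermask_lt limit mask (count_supermask_lt limit mask)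

-- ===== LEMMAS AND PROOFS =====

-- number of free positions (mask bit 0) strictly below n
def pvFB (mask : Int) : Nat → Nat
  | 0 => 0
  | n + 1 => pvFB mask n + (if pvBit mask n = 0 then 1 else 0)

-- B's total after positions 0 … n-1
def pvS (limit mask : Int) : Nat → Int
  | 0 => 0
  | n + 1 =>
      if pvBit mask n = 1 ∧ pvBit limit n = 0 then 0
      else pvS limit mask n + (if pvBit limit n = 1 ∧ pvBit mask n = 0 then 2 ^ pvFB mask n else 0)

-- "no forced mask bit meets a 0 bit of limit below n"
def pvValid (limit mask : Int) : Nat → Bool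
  | 0 => true
  | n + 1 => pvValid limit mask n && !(pvBit mask n == 1 && pvBit limit n == 0)

theorem pvBit_cases (x : Int) (p : Nat) : pvBit x p = 0 ∨ pvBit x p = 1 := by
  unfold pvBit
  rw [PySem.Int.band_one]
  have h1 := PySem.Int.mod_nonneg (x >>> p) (b := 2) (by omega)
  have h2 := PySem.Int.mod_lt (x >>> p) (b := 2) (by omega)
  omega

theorem pvAStep_eq (limit mask : Int) (p : Nat) (v : Bool) (l : Int) :
    pvAStep limit mask p ((if v then 1 else 0), l) =
      ((if v && !(pvBit mask p == 1 && pvBit limit p == 0) then 1 else 0),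
        (if pvBit mask p = 1 then l else l * 2) +
          (if v ∧ pvBit limit p = 1 ∧ pvBit mask p = 0 then 1 else 0)) := by
  rcases pvBit_cases mask p with hm | hm <;>
    rcases pvBit_cases limit p with hl | hl <;>
      cases v <;>
        by_cases hz : l = 0 <;>
          simp_all [pvAStep]

theorem pvALoop_eq (limit mask : Int) (n : Nat) (v : Bool) (l : Int) :
    pvALoop limit mask n ((if v then 1 else 0), l) =
      ((if v && pvValid limit mask n then 1 else 0),
        l * 2 ^ pvFB mask n + (if v then pvS limit mask n else 0)) := by
  induction n generalizing v l with
  | zero => simp [pvALoop, pvValid, pvFB, pvS]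
  | succ k ih =>
      show pvALoop limit mask k (pvAStep limit mask k _) = _
      rw [pvAStep_eq, ih]
      rcases pvBit_cases mask k with hm | hm <;>
        rcases pvBit_cases limit k with hl | hl <;>
          cases v <;>
            simp [pvValid, pvFB, pvS, hm, hl, pow_succ] <;> ring

theorem pvBLoop_eq (limit mask : Int) (n : Nat) :
    pvBLoop limit mask n = (pvS limit mask n, pvFB mask n) := by
  induction n with
  | zero => rfl
  | succ k ih =>
      show pvBStep limit mask k _ = _
      rw [ih]
      rcases pvBit_cases mask k with hm | hm <;>
        rcases pvBit_cases limit k with hl | hl <;>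
          simp [pvBStep, pvS, pvFB, hm, hl]

-- ===== VERDICT (by name: the statement is the Claim_ definition above) =====
theorem count_supermask_lt_spec : Claim_equal_count_supermask_lt := by
  intro limit mask _
  unfold Spec_count_supermask_lt count_supermask_lt count_supermask_lt_alt
  by_cases h : limit ≤ 0
  · simp [h]
  · simp only [h, if_false]
    have hA := pvALoop_eq limit mask (PySem.Int.bitLength limit) true 0
    simp only [if_true, Bool.true_and] at hA
    rw [hA, pvBLoop_eq]
    simp
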